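-- pv_equiv track=rewrite | github.com/chenyuxyz/bf.py | util/generate_bf.py | generate_int
-- ===== SOURCE A (Python) =====
-- def prime_factorize(n):
--     assert n > 0
--     def _fac(n, primes):
--         for i in range(2, n+1):
--             if i * i > n:
--                 if n > 1:
--                     primes.append(n)
--                 return primes
--             if n % i == 0:
--                 primes.append(i)
--                 return _fac(n // i, primes)
--     return [1] if n == 1 else _fac(n, [])
--
-- def generate_int(n):
--     def _generate(n):
--         if n == 0:
--             return ""
--         primes = prime_factorize(n)
--         bfcode = ">" * (len(primes) - 1)
--         bfcode += "[<".join("+" * p for p in primes)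
--         bfcode += ">-]" * (len(primes) - 1)
--         bfcode += "<" * (len(primes) - 1)
--         return bfcode
--     if n == 0:
--         return ""
--     bfcodes = [_generate(n)]
--     for i in range(1, 10):
--         if n-i >= 0:
--             bfcodes.append(_generate(n-i) + "+" * i)
--         if n+i < 256:
--             bfcodes.append(_generate(n+i) + "-" * i)
--     return min(bfcodes, key=len)
-- ===== SOURCE B (Python) =====
-- def prime_factorize(n):
--     assert n > 0
--     if n == 1:
--         return [1]
--     primes = []
--     i = 2
--     while i * i <= n:
--         if n % i == 0:
--             primes.append(i)
--             n //= i
--         else: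
--             i += 1
--     if n > 1:
--         primes.append(n)
--     return primes
--
-- def generate_int(n):
--     def _bf(m):
--         if m == 0:
--             return ""
--         ps = prime_factorize(m)
--         k = len(ps) - 1
--         return ">" * k + "[<".join("+" * p for p in ps) + ">-]" * k + "<" * k
--     if n == 0:
--         return ""
--     best = _bf(n)
--     for i in range(1, 10):
--         if n - i >= 0:
--             c = _bf(n - i) + "+" * i
--             if len(c) < len(best):
--                 best = c
--         if n + i < 256:
--             c = _bf(n + i) + "-" * i
--             if len(c) < len(best):
--                 best = c
--     return best
-- ===== Notes on version B (the rewrite author's own statement) =====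
-- stated objective: simpler
-- what changed: prime_factorize's restart-from-2 recursion becomes one iterative trial-division while-loop, and generate_int's candidate-list-then-min(key=len) becomes a single running-best scan over the same candidates in the same order with strict <, preserving min's first-minimum tie-breaking.
import Mathlib
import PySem

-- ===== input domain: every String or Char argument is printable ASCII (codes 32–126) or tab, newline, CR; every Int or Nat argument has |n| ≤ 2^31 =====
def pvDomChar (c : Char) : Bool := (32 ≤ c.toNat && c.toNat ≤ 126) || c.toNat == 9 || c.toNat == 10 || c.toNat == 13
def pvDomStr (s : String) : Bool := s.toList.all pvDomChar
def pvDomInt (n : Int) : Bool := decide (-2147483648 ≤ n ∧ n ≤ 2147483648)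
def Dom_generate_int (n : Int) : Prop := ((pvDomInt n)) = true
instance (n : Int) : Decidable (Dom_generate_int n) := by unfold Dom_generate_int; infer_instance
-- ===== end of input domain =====

-- B replaces A's recursive restart-from-2 prime factorisation by an iterative trial-division
-- loop and A's candidate-list + min(key=len) by a running-best scan in the same order;
-- objective: simpler.

-- ===== PORT A =====
-- "c" * k  (string repetition)
def pvRep (c : Char) (k : Int) : List Char := PySem.List.pyRepeat [c] k

-- used by pvFacA's termination proof
theorem pv_ediv_lt (n i : Int) (h1 : 0 < n) (h2 : 1 < i) : n / i < n := by
  apply Int.ediv_lt_of_lt_mul (by omega); nlinarith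

-- the inner `_fac(n, primes)`; parameter i is the `for i in range(2, n+1)` loop variable;
-- `i > n` is loop exhaustion (Python falls through returning None — unreachable from the
-- actual call sites, ported as returning primes)
def pvFacA (n : Int) (primes : List Int) (i : Int) : List Int :=
  if i > n then primes
  else if i * i > n then (if n > 1 then primes ++ [n] else primes)
  else if PySem.Int.mod n i = 0 then pvFacA (PySem.Int.floordiv n i) (primes ++ [i]) 2
  else pvFacA n primes (i + 1)
termination_by (n.toNat, (n + 1 - i).toNat)
decreasing_by
  · rename_i h1 h2 h3
    simp only [not_lt] at h1 h2
    rcases lt_trichotomy i 0 with hi | hi | hi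
    · have hn : 0 < n := by nlinarith
      have hq : PySem.Int.floordiv n i < 0 := by
        have hb := PySem.Int.mod_neg_bounds (a := n) (b := i) hi
        have hf := PySem.Int.floordiv_mul_add_mod n i
        nlinarith [hb.1, hb.2]
      left; omega
    · subst hi
      simp only [PySem.Int.mod] at h3
      have : n = 0 := by simpa using h3
      subst this
      have : PySem.Int.floordiv 0 0 = 0 := by simp [PySem.Int.floordiv]
      rw [this]; right; omega
    · rcases eq_or_lt_of_le (by omega : (1:Int) ≤ i) with hi1 | hi1
      · have : PySem.Int.floordiv n 1 = n := by
          rw [PySem.Int.floordiv_eq_ediv_of_pos (by omega)]; simp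
        rw [← hi1] at h1 h2 h3 ⊢
        rw [this]; right; omega
      · have hn : 0 < n := by nlinarith
        rw [PySem.Int.floordiv_eq_ediv_of_pos (by omega)]
        have hlt := pv_ediv_lt n i hn (by omega)
        have _hge : 0 ≤ n / i := Int.ediv_nonneg (by omega) (by omega)
        left; omega
  · rename_i h1 h2 _h3
    simp only [not_lt] at h1 h2
    right; omega

-- prime_factorize(n); the `assert n > 0` is Pre_'s business
def pvPrimeFacA (n : Int) : List Int := if n = 1 then [1] else pvFacA n [] 2

-- _generate(n)
def pvGenA (n : Int) : List Char :=
  if n = 0 then [] else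
    let primes := pvPrimeFacA n
    let k : Int := (primes.length : Int) - 1
    pvRep '>' k ++ PySem.Chars.join ['[', '<'] (primes.map (fun p => pvRep '+' p))
      ++ PySem.List.pyRepeat ['>', '-', ']'] k ++ pvRep '<' k

def generate_int (n : Int) : String :=
  if n = 0 then "" else
    let bfcodes : List (List Char) := [pvGenA n]
    let bfcodes := (PySem.List.pyRange 1 10).foldl (fun acc i =>
      let acc := if n - i ≥ 0 then acc ++ [pvGenA (n - i) ++ pvRep '+' i] else acc
      if n + i < 256 then acc ++ [pvGenA (n + i) ++ pvRep '-' i] else acc) bfcodes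
    match PySem.List.min? bfcodes (fun s => s.length) with
    | some m => String.ofList m
    | none => ""  -- unreachable: bfcodes is nonempty (min on [] would raise in Python)

-- ===== PORT B =====
-- the `while i * i <= n` trial-division loop of Source B; the fuel only makes the recursion
-- total (n.toNat + 2 steps always suffice on the proved domain)
def pvFacLoopB (fuel : Nat) (n i : Int) (acc : List Int) : List Int :=
  match fuel with
  | 0 => acc ++ (if n > 1 then [n] else [])
  | fuel + 1 =>
    if i * i ≤ n then
      if PySem.Int.mod n i = 0 then pvFacLoopB fuel (PySem.Int.floordiv n i) i (acc ++ [i])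
      else pvFacLoopB fuel n (i + 1) acc
    else acc ++ (if n > 1 then [n] else [])

-- Source B's prime_factorize
def pvPrimeFacB (n : Int) : List Int :=
  if n = 1 then [1] else pvFacLoopB (n.toNat + 2) n 2 []

-- _bf(m)
def pvGenB (m : Int) : List Char :=
  if m = 0 then [] else
    let ps := pvPrimeFacB m
    let k : Int := (ps.length : Int) - 1
    pvRep '>' k ++ PySem.Chars.join ['[', '<'] (ps.map (fun p => pvRep '+' p))
      ++ PySem.List.pyRepeat ['>', '-', ']'] k ++ pvRep '<' k

def generate_int_alt (n : Int) : String :=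
  if n = 0 then "" else
    let best := pvGenB n
    let best := (PySem.List.pyRange 1 10).foldl (fun best i =>
      let best := if n - i ≥ 0 then
          (let c := pvGenB (n - i) ++ pvRep '+' i
           if c.length < best.length then c else best)
        else best
      if n + i < 256 then
          (let c := pvGenB (n + i) ++ pvRep '-' i
           if c.length < best.length then c else best)
        else best) best
    String.ofList best

-- ===== PRECONDITION & SPEC =====
-- Python A raises AssertionError (`assert n > 0` in prime_factorize) for every negative n;
-- it returns normally on all n ≥ 0.
def Pre_generate_int (n : Int) : Prop := 0 ≤ n
instance (n : Int) : Decidable (Pre_generate_int n) := by unfold Pre_generate_int; infer_instance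
def pvWitness_generate_int : Int := 5

def Spec_generate_int (n : Int) (out : String) : Prop := out = generate_int_alt n
instance (n : Int) (out : String) : Decidable (Spec_generate_int n out) := by unfold Spec_generate_int; infer_instance

-- ===== CLAIM (what is proved, stated in full; the proofs are below) =====
def Claim_equal_generate_int : Prop := ∀ (n : Int), Dom_generate_int n → Pre_generate_int n → Spec_generate_int n (generate_int n)

-- ===== LEMMAS AND PROOFS =====

-- A's scan from i can be advanced past non-divisors below the square root
theorem pvFacA_advance (d : Nat) : ∀ (n : Int) (acc : List Int) (i : Int), 2 ≤ i →
    (∀ j : Int, i ≤ j → j < i + d → PySem.Int.mod n j ≠ 0 ∧ j * j ≤ n) →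
    pvFacA n acc i = pvFacA n acc (i + d) := by
  induction d with
  | zero => intro n acc i _ _; simp
  | succ d ih =>
    intro n acc i hi hinv
    have h0 := hinv i (le_refl _) (by omega)
    have hile : i ≤ n := by nlinarith [h0.2]
    rw [pvFacA]
    rw [if_neg (by omega), if_neg (by omega), if_neg h0.1]
    have := ih n acc (i + 1) (by omega) (fun j hj1 hj2 => hinv j (by omega) (by omega))
    rw [this]; congr 1; push_cast; ring

-- if n ≥ 2 has no divisor j with j*j ≤ n, A's scan from i returns acc ++ [n]
theorem pvFacA_term (d : Nat) : ∀ (n i : Int) (acc : List Int), 2 ≤ i → i ≤ n →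
    (n + 1 - i).toNat ≤ d → 2 ≤ n →
    (∀ j : Int, i ≤ j → j * j ≤ n → PySem.Int.mod n j ≠ 0) →
    pvFacA n acc i = acc ++ [n] := by
  induction d with
  | zero => intro n i acc hi hin hd hn _; omega
  | succ d ih =>
    intro n i acc hi hin hd hn hinv
    rw [pvFacA, if_neg (by omega)]
    by_cases hsq : i * i > n
    · rw [if_pos hsq, if_pos (by omega)]
    · simp only [not_lt] at hsq
      rw [if_neg (by omega), if_neg (hinv i (le_refl _) hsq)]
      have : i + 1 ≤ n := by nlinarith
      exact ih n (i+1) acc (by omega) this (by omega) hn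
        (fun j hj1 hj2 => hinv j (by omega) hj2)

-- terminal case: no divisor found below i and i*i > n, A returns acc plus the residual
theorem pvTerm (n i : Int) (acc : List Int) (hn : 1 ≤ n) (hi : 2 ≤ i) (hsq : n < i * i)
    (hinv : ∀ j : Int, 2 ≤ j → j < i → PySem.Int.mod n j ≠ 0) :
    pvFacA n acc 2 = acc ++ (if n > 1 then [n] else []) := by
  by_cases h1 : n = 1
  · subst h1
    rw [pvFacA, if_pos (by omega)]
    simp
  · have hn2 : 2 ≤ n := by omega
    rw [if_pos (by omega : n > 1)]
    apply pvFacA_term ((n + 1 - 2).toNat) n 2 acc (by omega) (by omega) (by omega) hn2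
    intro j hj hjj
    have hji : j < i := by nlinarith
    exact hinv j hj hji

-- the simulation: B's loop state (n, i, acc) corresponds to A's restart-from-2 scan
theorem pvFac_main (fuel : Nat) : ∀ (n i : Int) (acc : List Int), 1 ≤ n → 2 ≤ i →
    n + 1 ≤ (fuel : Int) + i →
    (∀ j : Int, 2 ≤ j → j < i → PySem.Int.mod n j ≠ 0) →
    pvFacA n acc 2 = pvFacLoopB fuel n i acc := by
  induction fuel with
  | zero =>
    intro n i acc hn hi hf hinv
    simp only [pvFacLoopB]
    exact pvTerm n i acc hn hi (by push_cast at hf; nlinarith) hinv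
  | succ f ih =>
    intro n i acc hn hi hf hinv
    simp only [pvFacLoopB]
    by_cases hsq : i * i ≤ n
    · rw [if_pos hsq]
      by_cases hm : PySem.Int.mod n i = 0
      · rw [if_pos hm]
        have hdvd : i ∣ n := (PySem.Int.mod_eq_zero_iff_dvd n i).mp hm
        have hfd : PySem.Int.floordiv n i = n / i :=
          PySem.Int.floordiv_eq_ediv_of_pos (by omega)
        have hmul : n / i * i = n := Int.ediv_mul_cancel hdvd
        have hge : i ≤ n / i := by nlinarith [hmul]
        have hadv : pvFacA n acc 2 = pvFacA n acc i := by
          have := pvFacA_advance ((i - 2).toNat) n acc 2 (by omega)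
            (fun j hj1 hj2 => ⟨hinv j hj1 (by omega), by
              have hji : j < i := by omega
              nlinarith [hsq, hji, hj1]⟩)
          rwa [show (2 : Int) + ((i - 2).toNat : Int) = i by omega] at this
        rw [hadv, pvFacA, if_neg (by nlinarith), if_neg (by omega), if_pos hm, hfd]
        apply ih (n / i) i (acc ++ [i]) (by omega) hi
        · have : n / i + n / i ≤ n := by nlinarith [hmul]
          push_cast at hf ⊢
          omega
        · intro j hj1 hj2 hjm
          have hjd : j ∣ n / i := (PySem.Int.mod_eq_zero_iff_dvd _ j).mp hjm
          have : j ∣ n := hjd.trans ⟨i, hmul.symm⟩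
          exact hinv j hj1 hj2 ((PySem.Int.mod_eq_zero_iff_dvd n j).mpr this)
      · rw [if_neg hm]
        apply ih n (i + 1) acc hn (by omega) (by push_cast at hf ⊢; omega)
        intro j hj1 hj2
        rcases eq_or_lt_of_le (by omega : j ≤ i) with h | h
        · subst h; exact hm
        · exact hinv j hj1 h
    · rw [if_neg hsq]
      exact pvTerm n i acc hn hi (by omega) hinv

theorem pvPrimeFac_eq (n : Int) (h : 1 ≤ n) : pvPrimeFacA n = pvPrimeFacB n := by
  unfold pvPrimeFacA pvPrimeFacB
  by_cases h1 : n = 1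
  · simp [h1]
  · rw [if_neg h1, if_neg h1]
    apply pvFac_main (n.toNat + 2) n 2 [] h (by omega) (by push_cast; omega)
    intro j hj1 hj2; omega

theorem pvGen_eq (m : Int) (h : 0 ≤ m) : pvGenA m = pvGenB m := by
  unfold pvGenA pvGenB
  by_cases h0 : m = 0
  · simp [h0]
  · rw [if_neg h0, if_neg h0, pvPrimeFac_eq m (by omega)]

-- min? over a snoc: the running best absorbs the new candidate (strict <, keep first)
theorem pvMin?_snoc (zs : List (List Char)) (c x : List Char)
    (h : PySem.List.min? zs (fun s => s.length) = some x) :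
    PySem.List.min? (zs ++ [c]) (fun s => s.length)
      = some (if c.length < x.length then c else x) := by
  simp only [PySem.List.min?] at *
  rw [List.foldl_append, h]
  simp only [List.foldl]
  split <;> simp

-- A's build-then-min over the candidate loop equals B's running-best scan
theorem pvMinFold (n : Int) : ∀ (l : List Int) (zs : List (List Char)) (x : List Char),
    PySem.List.min? zs (fun s => s.length) = some x →
    PySem.List.min? (l.foldl (fun acc i =>
        let acc := if n - i ≥ 0 then acc ++ [pvGenB (n - i) ++ pvRep '+' i] else acc
        if n + i < 256 then acc ++ [pvGenB (n + i) ++ pvRep '-' i] else acc) zs)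
        (fun s => s.length)
    = some (l.foldl (fun best i =>
        let best := if n - i ≥ 0 then
            (let c := pvGenB (n - i) ++ pvRep '+' i
             if c.length < best.length then c else best)
          else best
        if n + i < 256 then
            (let c := pvGenB (n + i) ++ pvRep '-' i
             if c.length < best.length then c else best)
          else best) x) := by
  intro l
  induction l with
  | nil => intro zs x h; simpa using h
  | cons i l ih =>
    intro zs x h
    simp only [List.foldl]
    apply ih
    by_cases h1 : n - i ≥ 0 <;> by_cases h2 : n + i < 256 <;>
      simp only [h1, h2, if_pos, if_neg, not_false_iff]
    · exact pvMin?_snoc _ _ _ (pvMin?_snoc _ _ _ h)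
    · exact pvMin?_snoc _ _ _ h
    · exact pvMin?_snoc _ _ _ h
    · exact h

-- ===== VERDICT (by name: the statement is the Claim_ definition above) =====
theorem generate_int_spec : Claim_equal_generate_int := by
  intro n _ hpre
  have hn : 0 ≤ n := hpre
  unfold Spec_generate_int generate_int generate_int_alt
  by_cases h0 : n = 0
  · simp [h0]
  · rw [if_neg h0, if_neg h0]
    show (match PySem.List.min? ((PySem.List.pyRange 1 10).foldl (fun acc i =>
        let acc := if n - i ≥ 0 then acc ++ [pvGenA (n - i) ++ pvRep '+' i] else acc
        if n + i < 256 then acc ++ [pvGenA (n + i) ++ pvRep '-' i] else acc) [pvGenA n])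
        (fun s => s.length) with
      | some m => String.ofList m
      | none => "")
      = String.ofList ((PySem.List.pyRange 1 10).foldl (fun best i =>
        let best := if n - i ≥ 0 then
            (let c := pvGenB (n - i) ++ pvRep '+' i
             if c.length < best.length then c else best)
          else best
        if n + i < 256 then
            (let c := pvGenB (n + i) ++ pvRep '-' i
             if c.length < best.length then c else best)
          else best) (pvGenB n))
    have hcongr : (PySem.List.pyRange 1 10).foldl (fun acc i =>
        let acc := if n - i ≥ 0 then acc ++ [pvGenA (n - i) ++ pvRep '+' i] else acc
        if n + i < 256 then acc ++ [pvGenA (n + i) ++ pvRep '-' i] else acc) [pvGenA n]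
      = (PySem.List.pyRange 1 10).foldl (fun acc i =>
        let acc := if n - i ≥ 0 then acc ++ [pvGenB (n - i) ++ pvRep '+' i] else acc
        if n + i < 256 then acc ++ [pvGenB (n + i) ++ pvRep '-' i] else acc) [pvGenA n] := by
      apply PySem.List.foldl_congr_mem
      intro acc i hmem
      have hi : 1 ≤ i ∧ i < 10 := PySem.List.mem_pyRange_one.mp hmem
      by_cases h1 : n - i ≥ 0 <;> by_cases h2 : n + i < 256 <;>
        simp only [h1, h2, if_pos, if_neg, not_false_iff] <;>
        (try rw [pvGen_eq (n - i) (by omega)]) <;>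
        (try rw [pvGen_eq (n + i) (by rcases hi with ⟨hi1, hi2⟩; omega)])
    rw [hcongr, pvGen_eq n hn]
    rw [pvMinFold n (PySem.List.pyRange 1 10) [pvGenB n] (pvGenB n)
      (by simp [PySem.List.min?])]
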